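-- pv_equiv track=rewrite | github.com/bajloml/ip_cam_iface | python_test_endian/byte_test.py | create_exp
-- ===== SOURCE A (Python) =====
-- def create_exp(num_of_samples, words_in_sample, x_axis):
--     num = 0
--     power = 2
--     data = []
--
--     for i in range(int(num_of_samples * words_in_sample)):
--         if ((i!=0) and i%words_in_sample==0):
--             num+=1
--
--         data.append((x_axis[num] + (i%words_in_sample * 10))**power)
--
--     return data
-- ===== SOURCE B (Python) =====
-- def create_exp(num_of_samples, words_in_sample, x_axis):
--     if num_of_samples <= 0 or words_in_sample <= 0:
--         return []
--     # 2-D comprehension: sample index s outer, word index w inner.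
--     return [(x_axis[s] + w * 10) ** 2
--             for s in range(num_of_samples)
--             for w in range(words_in_sample)]
-- ===== Notes on version B (the rewrite author's own statement) =====
-- stated objective: simpler
-- what changed: Replaces A's flat loop over range(n*w) with its manual `num` counter and `i % words_in_sample` arithmetic by a plain 2-D comprehension (sample index outer, word offset inner), exposing the row structure directly.
-- intended difference: When num_of_samples < 0 and words_in_sample < 0 the product int(n*w) is positive, so A still iterates and returns n*w squares built with Python's negative modulus -- an accident of the sign arithmetic; B returns [], the intended output for a negative number of samples. — e.g. on create_exp(-1, -1, [5]): A returns [25], B returns []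
import Mathlib
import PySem

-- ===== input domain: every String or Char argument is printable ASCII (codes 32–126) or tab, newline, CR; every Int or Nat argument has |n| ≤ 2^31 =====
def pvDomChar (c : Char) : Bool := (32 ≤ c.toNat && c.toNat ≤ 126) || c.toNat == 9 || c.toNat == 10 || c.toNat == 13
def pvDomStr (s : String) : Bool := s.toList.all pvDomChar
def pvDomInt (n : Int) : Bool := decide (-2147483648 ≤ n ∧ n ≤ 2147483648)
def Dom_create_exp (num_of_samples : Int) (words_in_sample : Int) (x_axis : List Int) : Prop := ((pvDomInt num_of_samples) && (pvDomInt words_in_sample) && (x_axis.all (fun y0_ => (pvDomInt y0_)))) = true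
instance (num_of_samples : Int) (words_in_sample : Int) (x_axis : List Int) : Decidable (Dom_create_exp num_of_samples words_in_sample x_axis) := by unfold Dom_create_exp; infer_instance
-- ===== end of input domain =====

-- B replaces A's flat loop with the manual `num` counter and `i % words_in_sample`
-- arithmetic by a plain 2-D comprehension (sample index outer, word index inner): simpler.

-- ===== PORT A =====
-- loop body of A (one iteration: maybe increment num, then append using the updated num)
def pvStepA (w : Int) (x : List Int) (st : Int × List Int) (i : Int) : Int × List Int :=
  let num := if i ≠ 0 ∧ PySem.Int.mod i w = 0 then st.1 + 1 else st.1
  (num, st.2 ++ [(PySem.List.pyGetD x num 0 + PySem.Int.mod i w * 10) ^ 2])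

-- x_axis[num] via pyGetD: num is always ≥ 0 here and Pre_ keeps it in range (Python raises otherwise)
def create_exp (num_of_samples : Int) (words_in_sample : Int) (x_axis : List Int) : List Int :=
  ((PySem.List.pyRange 0 (num_of_samples * words_in_sample) 1).foldl
    (pvStepA words_in_sample x_axis) (0, [])).2

-- ===== PORT B =====
-- one sample row: [(x_axis[s] + w*10)**2 for w in range(words_in_sample)]
def pvRow (w : Int) (x : List Int) (s : Int) : List Int :=
  (PySem.List.pyRange 0 w 1).map (fun j => (PySem.List.pyGetD x s 0 + j * 10) ^ 2)

def create_exp_alt (num_of_samples : Int) (words_in_sample : Int) (x_axis : List Int) : List Int :=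
  if num_of_samples ≤ 0 ∨ words_in_sample ≤ 0 then []
  else (PySem.List.pyRange 0 num_of_samples 1).flatMap (pvRow words_in_sample x_axis)

-- ===== PRECONDITION & SPEC =====
-- Pre_ excludes exactly the inputs where A raises IndexError: when the loop is nonempty,
-- x_axis must have at least |num_of_samples| elements (num climbs to |num_of_samples|-1).
def Pre_create_exp (num_of_samples : Int) (words_in_sample : Int) (x_axis : List Int) : Prop :=
  1 ≤ num_of_samples * words_in_sample → num_of_samples.natAbs ≤ x_axis.length
instance (num_of_samples : Int) (words_in_sample : Int) (x_axis : List Int) : Decidable (Pre_create_exp num_of_samples words_in_sample x_axis) := by unfold Pre_create_exp; infer_instance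

def pvWitness_create_exp : Int × Int × List Int := (2, 3, [1, 2])

-- When both counts are negative the product int(n*w) is positive, so A still iterates and
-- returns n*w squares built with Python's negative modulus — an accident of the sign
-- arithmetic; B returns [], the intended output for a negative number of samples.
def D_create_exp (num_of_samples : Int) (words_in_sample : Int) (x_axis : List Int) : Prop :=
  num_of_samples < 0 ∧ words_in_sample < 0
instance (num_of_samples : Int) (words_in_sample : Int) (x_axis : List Int) : Decidable (D_create_exp num_of_samples words_in_sample x_axis) := by unfold D_create_exp; infer_instance

def Spec_create_exp (num_of_samples : Int) (words_in_sample : Int) (x_axis : List Int) (out : List Int) : Prop := ¬ D_create_exp num_of_samples words_in_sample x_axis → out = create_exp_alt num_of_samples words_in_sample x_axis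
instance (num_of_samples : Int) (words_in_sample : Int) (x_axis : List Int) (out : List Int) : Decidable (Spec_create_exp num_of_samples words_in_sample x_axis out) := by unfold Spec_create_exp; infer_instance

def pvDiffWitness_create_exp : Int × Int × List Int := (-1, -1, [5])
def pvDiffWitnessOut_create_exp : (List Int) × (List Int) := ([25], [])

-- ===== CLAIM (what is proved, stated in full; the proofs are below) =====
def Claim_unchanged_create_exp : Prop := ∀ (num_of_samples : Int) (words_in_sample : Int) (x_axis : List Int), Dom_create_exp num_of_samples words_in_sample x_axis → Pre_create_exp num_of_samples words_in_sample x_axis → Spec_create_exp num_of_samples words_in_sample x_axis (create_exp num_of_samples words_in_sample x_axis)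
def Claim_changed_create_exp : Prop := Dom_create_exp (pvDiffWitness_create_exp.1) (pvDiffWitness_create_exp.2.1) (pvDiffWitness_create_exp.2.2) ∧ Pre_create_exp (pvDiffWitness_create_exp.1) (pvDiffWitness_create_exp.2.1) (pvDiffWitness_create_exp.2.2) ∧ D_create_exp (pvDiffWitness_create_exp.1) (pvDiffWitness_create_exp.2.1) (pvDiffWitness_create_exp.2.2) ∧ create_exp (pvDiffWitness_create_exp.1) (pvDiffWitness_create_exp.2.1) (pvDiffWitness_create_exp.2.2) = pvDiffWitnessOut_create_exp.1 ∧ create_exp_alt (pvDiffWitness_create_exp.1) (pvDiffWitness_create_exp.2.1) (pvDiffWitness_create_exp.2.2) = pvDiffWitnessOut_create_exp.2 ∧ pvDiffWitnessOut_create_exp.1 ≠ pvDiffWitnessOut_create_exp.2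
def Claim_exact_create_exp : Prop := ∀ (num_of_samples : Int) (words_in_sample : Int) (x_axis : List Int), Dom_create_exp num_of_samples words_in_sample x_axis → Pre_create_exp num_of_samples words_in_sample x_axis → D_create_exp num_of_samples words_in_sample x_axis → create_exp num_of_samples words_in_sample x_axis ≠ create_exp_alt num_of_samples words_in_sample x_axis

-- ===== LEMMAS AND PROOFS =====

-- the second component of A's fold grows by one element per iteration
theorem pvStepA_len (w : Int) (x : List Int) :
    ∀ (l : List Int) (st : Int × List Int),
      ((l.foldl (pvStepA w x) st).2).length = st.2.length + l.length := by
  intro l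
  induction l with
  | nil => intro st; simp
  | cons i l ih =>
      intro st
      simp only [List.foldl_cons, ih]
      simp [pvStepA]
      omega

-- tail of one sample block: offsets t..w-1, i = s*w + t never triggers the increment
theorem pvTail (w : Int) (hw : 0 < w) (x : List Int) (s : Int) (hs : 0 ≤ s) :
    ∀ (k : Nat) (t : Int) (acc : List Int), (w - t).toNat = k → 1 ≤ t → t ≤ w →
      ∀ (num : Int),
      (PySem.List.pyRange (s * w + t) (s * w + w) 1).foldl (pvStepA w x) (num, acc)
        = (num, acc ++ (PySem.List.pyRange t w 1).map
            (fun j => (PySem.List.pyGetD x num 0 + j * 10) ^ 2)) := by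
  intro k
  induction k with
  | zero =>
      intro t acc hk h1 h2 num
      have ht : t = w := by omega
      subst ht
      simp [PySem.List.pyRange_one_eq_nil (le_refl _)]
  | succ k ih =>
      intro t acc hk h1 h2 num
      have htw : t < w := by omega
      rw [PySem.List.pyRange_one_cons (by omega : s * w + t < s * w + w)]
      rw [PySem.List.pyRange_one_cons htw]
      have hmod : PySem.Int.mod (s * w + t) w = t := by
        rw [PySem.Int.mod_eq_emod_of_pos hw,
          show s * w + t = t + w * s from by ring, Int.add_mul_emod_self_left]
        exact Int.emod_eq_of_lt (by omega) htw
      have hstep : pvStepA w x (num, acc) (s * w + t)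
          = (num, acc ++ [(PySem.List.pyGetD x num 0 + t * 10) ^ 2]) := by
        simp [pvStepA, hmod]
        refine ⟨fun _ => by omega, ?_⟩
        rw [if_neg (fun h => absurd h.2 (by omega : ¬ t = 0))]
      rw [List.foldl_cons, hstep,
        show s * w + t + 1 = s * w + (t + 1) from by ring,
        ih (t + 1) (acc ++ [(PySem.List.pyGetD x num 0 + t * 10) ^ 2]) (by omega)
          (by omega) (by omega) num]
      simp

-- one whole sample block: entering with num = (if s = 0 then 0 else s-1), the first
-- iteration settles num at s and the block appends exactly pvRow w x s
theorem pvBlock (w : Int) (hw : 0 < w) (x : List Int) (s : Int) (hs : 0 ≤ s)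
    (acc : List Int) (num : Int) (hnum : num = if s = 0 then 0 else s - 1) :
    (PySem.List.pyRange (s * w) (s * w + w) 1).foldl (pvStepA w x) (num, acc)
      = (s, acc ++ pvRow w x s) := by
  rw [PySem.List.pyRange_one_cons (by omega : s * w < s * w + w), List.foldl_cons]
  have hmod : PySem.Int.mod (s * w) w = 0 := by
    rw [PySem.Int.mod_eq_emod_of_pos hw]
    simp [Int.mul_emod_left]
  have hstep : pvStepA w x (num, acc) (s * w)
      = (s, acc ++ [(PySem.List.pyGetD x s 0 + 0 * 10) ^ 2]) := by
    rcases eq_or_lt_of_le hs with h0 | hpos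
    · rw [← h0] at hnum ⊢
      simp at hnum
      subst hnum
      simp [pvStepA, PySem.Int.mod_eq_emod_of_pos hw]
    · have hne : s * w ≠ 0 := by positivity
      have hnum' : num = s - 1 := by rw [hnum, if_neg (by omega)]
      rw [hnum']
      simp [pvStepA, hmod, hne]
  rw [hstep]
  rw [pvTail w hw x s hs (w - 1).toNat 1
    (acc ++ [(PySem.List.pyGetD x s 0 + 0 * 10) ^ 2]) rfl (le_refl 1) hw s]
  unfold pvRow
  rw [PySem.List.pyRange_one_cons hw]
  simp

-- the whole loop of A, for m samples of w words each, equals B's flatMap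
theorem pvMain (w : Int) (hw : 0 < w) (x : List Int) :
    ∀ (m : Nat),
      (PySem.List.pyRange 0 ((m : Int) * w) 1).foldl (pvStepA w x) (0, [])
        = ((if (m : Int) = 0 then 0 else (m : Int) - 1),
           (PySem.List.pyRange 0 (m : Int) 1).flatMap (pvRow w x)) := by
  intro m
  induction m with
  | zero => simp [PySem.List.pyRange_one_eq_nil (le_refl (0 : Int))]
  | succ k ih =>
      have hcast : ((k + 1 : Nat) : Int) * w = (k : Int) * w + w := by push_cast; ring
      have hk0 : (0 : Int) ≤ (k : Int) * w := by positivity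
      rw [hcast,
        PySem.List.pyRange_one_append 0 ((k : Int) * w) ((k : Int) * w + w) hk0 (by omega),
        List.foldl_append, ih,
        pvBlock w hw x (k : Int) (by positivity) _ _ rfl]
      have hsucc : ((k + 1 : Nat) : Int) = (k : Int) + 1 := by push_cast; ring
      rw [hsucc, PySem.List.pyRange_one_succ_right (by positivity)]
      simp [List.flatMap_append]
      omega

-- ===== VERDICT (by name: the statement is the Claim_ definition above) =====
theorem create_exp_spec : Claim_unchanged_create_exp := by
  intro n w x hdom hpre hD
  by_cases hpos : 0 < n ∧ 0 < w
  · obtain ⟨hn, hw⟩ := hpos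
    lift n to Nat using hn.le with m
    unfold create_exp create_exp_alt
    rw [pvMain w hw x m, if_neg (by omega : ¬((m : Int) ≤ 0 ∨ w ≤ 0))]
  · have hle : n ≤ 0 ∨ w ≤ 0 := by omega
    have hprod : n * w ≤ 0 := by
      have hcases : (n ≤ 0 ∧ 0 ≤ w) ∨ (0 ≤ n ∧ w ≤ 0) := by
        unfold D_create_exp at hD
        omega
      rcases hcases with ⟨h1, h2⟩ | ⟨h1, h2⟩
      · nlinarith
      · nlinarith
    unfold create_exp create_exp_alt
    rw [PySem.List.pyRange_one_eq_nil hprod, if_pos hle]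
    rfl

theorem create_exp_changed : Claim_changed_create_exp := by
  unfold Claim_changed_create_exp
  refine ⟨by decide, by decide, by decide, ?_, by decide, by decide⟩
  decide

theorem create_exp_tight : Claim_exact_create_exp := by
  intro n w x hdom hpre hD
  obtain ⟨hn, hw⟩ := hD
  have hB : create_exp_alt n w x = [] := by
    unfold create_exp_alt
    rw [if_pos (Or.inl hn.le)]
  rw [hB]
  intro hA
  have hlen := pvStepA_len w x (PySem.List.pyRange 0 (n * w) 1) (0, [])
  unfold create_exp at hA
  rw [hA] at hlen
  rw [PySem.List.length_pyRange_one] at hlen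
  have hprod : 1 ≤ n * w := by nlinarith
  simp at hlen
  omega
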